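-- pv_equiv track=rewrite | github.com/tiagocoutinho/qredis | qredis/util.py | redis_key_split
-- ===== SOURCE A (Python) =====
-- def redis_key_split(key, chars="."):
--     result, curr = [], ""
--     for char in key:
--         if char in chars:
--             result.append(curr)
--             curr = ""
--         curr += char
--     if curr:
--         result.append(curr)
--     return result
-- ===== SOURCE B (Python) =====
-- def redis_key_split(key, chars="."):
--     if not key:
--         return []
--     bounds = [0] + [i for i, c in enumerate(key) if c in chars]
--     return [key[a:b] for a, b in zip(bounds, bounds[1:])] + [key[bounds[-1]:]]
-- ===== Notes on version B (the rewrite author's own statement) =====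
-- stated objective: simpler
-- what changed: A accumulates segments char-by-char in a running buffer; B computes the delimiter positions once with a comprehension and builds the result by slicing the key between consecutive boundaries.
import Mathlib
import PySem

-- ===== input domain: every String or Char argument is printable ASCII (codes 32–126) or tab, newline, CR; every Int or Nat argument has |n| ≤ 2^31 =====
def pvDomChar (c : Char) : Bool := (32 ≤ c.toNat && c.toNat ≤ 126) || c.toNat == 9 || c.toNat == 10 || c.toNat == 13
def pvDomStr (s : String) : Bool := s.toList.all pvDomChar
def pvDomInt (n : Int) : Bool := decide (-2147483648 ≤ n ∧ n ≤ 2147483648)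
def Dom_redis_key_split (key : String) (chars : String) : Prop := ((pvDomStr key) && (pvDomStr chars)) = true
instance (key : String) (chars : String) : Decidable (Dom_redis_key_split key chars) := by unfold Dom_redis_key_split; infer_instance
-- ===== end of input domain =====

-- B replaces A's char-by-char accumulator loop by computing the delimiter positions once and
-- slicing the key between consecutive boundaries (different decomposition, same cost).

-- ===== PORT A =====
-- 'char in chars' tests a single character, so it is exactly membership of that char in chars.
-- Loop body of A: append-and-reset on a delimiter, then always extend curr by the char.
def rksStep (chs : List Char) (p : List String × List Char) (char : Char) : List String × List Char :=
  let p := if chs.contains char then (p.1 ++ [String.ofList p.2], ([] : List Char)) else p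
  (p.1, p.2 ++ [char])

def redis_key_split (key : String) (chars : String) : List String :=
  let st := key.toList.foldl (rksStep chars.toList) ([], [])
  if st.2 ≠ [] then st.1 ++ [String.ofList st.2] else st.1

-- ===== PORT B =====
def redis_key_split_alt (key : String) (chars : String) : List String :=
  if key.toList = [] then []
  else
    let bounds : List Int :=
      0 :: (PySem.List.enumerate key.toList).filterMap
        (fun p => if chars.toList.contains p.2 then some p.1 else none)
    (bounds.zip bounds.tail).map
        (fun p => String.ofList (PySem.List.slice key.toList (some p.1) (some p.2)))
      ++ [String.ofList (PySem.List.slice key.toList (some (bounds.getLastD 0)) none)]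

-- ===== PRECONDITION & SPEC =====
def Spec_redis_key_split (key : String) (chars : String) (out : List String) : Prop := out = redis_key_split_alt key chars
instance (key : String) (chars : String) (out : List String) : Decidable (Spec_redis_key_split key chars out) := by unfold Spec_redis_key_split; infer_instance

-- ===== CLAIM (what is proved, stated in full; the proofs are below) =====
def Claim_equal_redis_key_split : Prop := ∀ (key : String) (chars : String), Dom_redis_key_split key chars → Spec_redis_key_split key chars (redis_key_split key chars)

-- ===== LEMMAS AND PROOFS =====

/-- Prepend a char to the first segment (creating it if absent). -/
def consHead (c : Char) : List (List Char) → List (List Char)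
  | [] => [[c]]
  | s :: ss => (c :: s) :: ss

/-- The segments of a list: each delimiter starts a fresh segment. -/
def segsS (D : Char → Bool) : List Char → List (List Char)
  | [] => []
  | c :: t => (if D c then [[]] else []) ++ consHead c (segsS D t)

/-- Prepend a pending accumulator to the first segment; dropped if everything is empty. -/
def consHeadL (curr : List Char) : List (List Char) → List (List Char)
  | [] => if curr = [] then [] else [curr]
  | s :: ss => (curr ++ s) :: ss

lemma consHeadL_nil (s : List (List Char)) : consHeadL [] s = s := by
  cases s <;> simp [consHeadL]

lemma consHeadL_append (curr : List Char) (c : Char) (s : List (List Char)) :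
    consHeadL (curr ++ [c]) s = consHeadL curr (consHead c s) := by
  cases s <;> simp [consHeadL, consHead]

lemma rksStep_pos (chs : List Char) (p : List String × List Char) (c : Char)
    (h : chs.contains c) : rksStep chs p c = (p.1 ++ [String.ofList p.2], [c]) := by
  have hm : c ∈ chs := by simpa using h
  simp [rksStep, hm]

lemma rksStep_neg (chs : List Char) (p : List String × List Char) (c : Char)
    (h : ¬ chs.contains c) : rksStep chs p c = (p.1, p.2 ++ [c]) := by
  have hm : c ∉ chs := by simpa using h
  simp [rksStep, hm]

/-- Invariant of A's loop. -/
lemma foldA (chs : List Char) : ∀ (t : List Char) (res : List String) (curr : List Char),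
    (if (t.foldl (rksStep chs) (res, curr)).2 ≠ [] then
        (t.foldl (rksStep chs) (res, curr)).1
          ++ [String.ofList (t.foldl (rksStep chs) (res, curr)).2]
      else (t.foldl (rksStep chs) (res, curr)).1)
    = res ++ (consHeadL curr (segsS (fun c => chs.contains c) t)).map String.ofList := by
  intro t
  induction t with
  | nil => intro res curr; by_cases h : curr = [] <;> simp [consHeadL, segsS, h]
  | cons c t ih =>
    intro res curr
    by_cases h : chs.contains c
    · have hm : c ∈ chs := by simpa using h
      rw [List.foldl_cons, rksStep_pos chs _ c h, ih]
      rw [show segsS (fun c => chs.contains c) (c :: t)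
            = (if chs.contains c then [[]] else [])
              ++ consHead c (segsS (fun c => chs.contains c) t) from rfl]
      rw [if_pos h]
      cases hs : segsS (fun c => chs.contains c) t <;>
        simp [consHead, consHeadL, List.append_assoc]
    · have hm : c ∉ chs := by simpa using h
      rw [List.foldl_cons, rksStep_neg chs _ c h, ih, consHeadL_append]
      rw [show segsS (fun c => chs.contains c) (c :: t)
            = (if chs.contains c then [[]] else [])
              ++ consHead c (segsS (fun c => chs.contains c) t) from rfl]
      rw [if_neg h]
      simp

/-- Port A computes the segments. -/
lemma portA_eq (key chars : String) :
    redis_key_split key chars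
      = (segsS (fun c => chars.toList.contains c) key.toList).map String.ofList := by
  have h := foldA chars.toList key.toList [] []
  simpa [redis_key_split, consHeadL_nil] using h

/-- Delimiter positions (as Nat offsets). -/
def posN (D : Char → Bool) : List Char → List Nat
  | [] => []
  | c :: t => (if D c then [0] else []) ++ (posN D t).map (· + 1)

/-- The slice of `t` between two boundaries. -/
def segOf (t : List Char) (p : Nat × Nat) : List Char := (t.drop p.1).take (p.2 - p.1)

/-- B's value at the list level, with Nat positions. -/
def bvaln (D : Char → Bool) (t : List Char) : List (List Char) :=
  ((0 :: posN D t).zip (posN D t)).map (segOf t) ++ [t.drop ((0 :: posN D t).getLastD 0)]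

lemma getLastD_map_succ : ∀ (l : List Nat) (a : Nat),
    (l.map (· + 1)).getLastD (a + 1) = l.getLastD a + 1 := by
  intro l
  induction l with
  | nil => intro a; simp
  | cons b l ih =>
    intro a
    rw [List.map_cons, List.getLastD_cons, List.getLastD_cons]
    exact ih b

lemma bvaln_core (D : Char → Bool) (c : Char) (t : List Char) :
    ((0 :: (posN D t).map (· + 1)).zip ((posN D t).map (· + 1))).map (segOf (c :: t))
        ++ [(c :: t).drop ((0 :: (posN D t).map (· + 1)).getLastD 0)]
      = consHead c (bvaln D t) := by
  cases hp : posN D t with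
  | nil => simp [bvaln, hp, consHead]
  | cons q q' =>
    have hz : ((q + 1) :: q'.map (· + 1)).zip (q'.map (· + 1))
        = ((q :: q').zip q').map (Prod.map (· + 1) (· + 1)) := by
      simpa using (List.zip_map (f := (· + 1)) (g := (· + 1)) (l₁ := q :: q') (l₂ := q'))
    have hseg : ∀ pr : Nat × Nat,
        segOf (c :: t) (Prod.map (· + 1) (· + 1) pr) = segOf t pr := by
      intro pr; simp [segOf, Prod.map]
    have hhead : segOf (c :: t) (0, q + 1) = c :: segOf t (0, q) := by
      simp [segOf]
    simp only [bvaln, hp, List.map_cons, List.zip_cons_cons, List.map_cons,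
      List.getLastD_cons, List.cons_append, consHead]
    rw [hz, List.map_map]
    have hmap : List.map (segOf (c :: t) ∘ Prod.map (· + 1) (· + 1)) ((q :: q').zip q')
        = List.map (segOf t) ((q :: q').zip q') :=
      List.map_congr_left (fun pr _ => by simpa using hseg pr)
    rw [hmap, hhead, getLastD_map_succ, List.drop_succ_cons]

lemma bvaln_cons (D : Char → Bool) (c : Char) (t : List Char) :
    bvaln D (c :: t) = (if D c then [[]] else []) ++ consHead c (bvaln D t) := by
  by_cases h : D c
  · rw [show bvaln D (c :: t)
        = ((0 :: posN D (c :: t)).zip (posN D (c :: t))).map (segOf (c :: t))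
          ++ [(c :: t).drop ((0 :: posN D (c :: t)).getLastD 0)] from rfl]
    simp only [posN, h, if_pos, List.singleton_append, List.zip_cons_cons, List.map_cons,
      List.getLastD_cons]
    rw [← bvaln_core D c t]
    rw [List.getLastD_cons]
    rfl
  · rw [show bvaln D (c :: t)
        = ((0 :: posN D (c :: t)).zip (posN D (c :: t))).map (segOf (c :: t))
          ++ [(c :: t).drop ((0 :: posN D (c :: t)).getLastD 0)] from rfl]
    simp only [posN, h, if_neg, Bool.false_eq_true, not_false_iff, List.nil_append]
    rw [← bvaln_core D c t]

lemma bvaln_eq_segsS (D : Char → Bool) : ∀ (t : List Char), t ≠ [] → bvaln D t = segsS D t := by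
  intro t
  induction t with
  | nil => intro h; exact absurd rfl h
  | cons c t ih =>
    intro _
    rw [bvaln_cons, segsS]
    cases t with
    | nil => simp [bvaln, posN, consHead, segsS]
    | cons d t' => rw [ih (by simp)]

/-- enumerate-based position comprehension = posN, shifted by the start. -/
lemma enum_filterMap (D : Char → Bool) : ∀ (l : List Char) (s : Nat),
    (PySem.List.enumerate l (s : Int)).filterMap (fun p => if D p.2 then some p.1 else none)
      = (posN D l).map (fun n => ((n + s : Nat) : Int)) := by
  intro l
  induction l with
  | nil => intro s; simp [PySem.List.enumerate_nil, posN]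
  | cons c t ih =>
    intro s
    rw [PySem.List.enumerate_cons]
    have h1 : ((s : Int) + 1) = ((s + 1 : Nat) : Int) := by push_cast; ring
    have h2 : (posN D t).map ((fun n => ((n + s : Nat) : Int)) ∘ (· + 1))
        = (posN D t).map (fun n => ((n + (s + 1) : Nat) : Int)) := by
      apply List.map_congr_left
      intro n _
      simp only [Function.comp_apply]
      congr 1
      omega
    by_cases h : D c
    · simp only [List.filterMap_cons, h, if_pos, h1, ih (s + 1), posN, List.singleton_append,
        List.map_cons, List.map_map]
      rw [h2]
      refine List.cons_eq_cons.mpr ⟨?_, rfl⟩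
      norm_num
    · simp only [List.filterMap_cons, h, if_neg, Bool.false_eq_true, not_false_iff, h1,
        ih (s + 1), posN, List.nil_append, List.map_map]
      rw [h2]

lemma getLastD_map_cast : ∀ (l : List Nat) (a : Nat),
    (l.map (fun n : Nat => (n : Int))).getLastD (a : Int) = ((l.getLastD a : Nat) : Int) := by
  intro l
  induction l with
  | nil => intro a; simp
  | cons b l ih =>
    intro a
    rw [List.map_cons, List.getLastD_cons, List.getLastD_cons]
    exact ih b

lemma slice_cast (t : List Char) (a b : Nat) :
    PySem.List.slice t (some (a : Int)) (some (b : Int)) = segOf t (a, b) := by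
  rw [PySem.List.slice_toNat t (by positivity) (by positivity)]
  simp [segOf]

/-- Port B computes the segments (nonempty key). -/
lemma portB_eq (key chars : String) (h : key.toList ≠ []) :
    redis_key_split_alt key chars
      = (bvaln (fun c => chars.toList.contains c) key.toList).map String.ofList := by
  have henum := enum_filterMap (fun c => chars.toList.contains c) key.toList 0
  simp only [Nat.cast_zero, Nat.add_zero] at henum
  have hcons : (0 : Int) :: (posN (fun c => chars.toList.contains c) key.toList).map
        (fun n : Nat => (n : Int))
      = ((0 :: posN (fun c => chars.toList.contains c) key.toList).map
        (fun n : Nat => (n : Int))) := by simp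
  have htail : ((0 :: posN (fun c => chars.toList.contains c) key.toList).map
        (fun n : Nat => (n : Int))).tail
      = (posN (fun c => chars.toList.contains c) key.toList).map (fun n : Nat => (n : Int)) := by
    simp
  have hzip : ((0 :: posN (fun c => chars.toList.contains c) key.toList).map
          (fun n : Nat => (n : Int))).zip
        ((posN (fun c => chars.toList.contains c) key.toList).map (fun n : Nat => (n : Int)))
      = ((0 :: posN (fun c => chars.toList.contains c) key.toList).zip
          (posN (fun c => chars.toList.contains c) key.toList)).map
          (Prod.map (fun n : Nat => (n : Int)) (fun n : Nat => (n : Int))) :=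
    List.zip_map
  have hlast := getLastD_map_cast
    (0 :: posN (fun c => chars.toList.contains c) key.toList) 0
  simp only [Nat.cast_zero] at hlast
  rw [redis_key_split_alt, if_neg h]
  simp only [henum, hcons, htail, hzip, hlast]
  rw [bvaln, List.map_append, List.map_map, List.map_map]
  congr 1
  · apply List.map_congr_left
    intro pr _
    simp only [Function.comp_apply, Prod.map]
    rw [slice_cast]
  · rw [PySem.List.slice_from _ (by positivity)]
    simp

-- ===== VERDICT (by name: the statement is the Claim_ definition above) =====
theorem redis_key_split_spec : Claim_equal_redis_key_split := by
  intro key chars _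
  unfold Spec_redis_key_split
  by_cases h : key.toList = []
  · rw [portA_eq, redis_key_split_alt, if_pos h, h]
    simp [segsS]
  · rw [portA_eq, portB_eq key chars h, bvaln_eq_segsS _ _ h]
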